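-- pv_equiv track=rewrite | github.com/mywajdi123/car-part-searcher-with-Ai | backend/cnn_model.py | _get_part_category
-- ===== SOURCE A (Python) =====
-- def _get_part_category(part_type: str) -> str:
--     """Map part type to general category"""
--     categories = {
--         'Engine': ['Air Filter', 'Oil Filter', 'Fuel Filter', 'Spark Plug', 'Ignition Coil',
--                   'Timing Belt', 'Serpentine Belt', 'V-Belt', 'Chain', 'Fuel Pump',
--                   'Fuel Injector', 'Throttle Body'],
--         'Brakes': ['Brake Pad', 'Brake Rotor', 'Brake Caliper', 'Brake Line'],
--         'Electrical': ['Alternator', 'Starter', 'Battery', 'Voltage Regulator', 'MAF Sensor',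
--                       'O2 Sensor', 'MAP Sensor', 'TPS Sensor', 'Knock Sensor'],
--         'Cooling': ['Radiator', 'Thermostat', 'Water Pump', 'Cooling Fan'],
--         'Suspension': ['Shock Absorber', 'Strut', 'Spring', 'Control Arm', 'Tie Rod',
--                       'Ball Joint', 'Stabilizer Bar', 'Bushing'],
--         'Lighting': ['Headlight', 'Taillight', 'Turn Signal', 'Bulb'],
--         'Wheels': ['Tire', 'Rim', 'Hub Cap', 'Valve Stem'],
--         'Exhaust': ['Exhaust Pipe', 'Muffler'],
--         'Filtration': ['Cabin Filter']
--     }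
--
--     for category, parts in categories.items():
--         if part_type in parts:
--             return category
--
--     return 'General'
-- ===== SOURCE B (Python) =====
-- # B: a flat part->category dict literal replaces the per-call scan over per-category lists; one lookup with a 'General' default (idiomatic).
-- _PART_TO_CATEGORY = {
--     'Air Filter': 'Engine',
--     'Oil Filter': 'Engine',
--     'Fuel Filter': 'Engine',
--     'Spark Plug': 'Engine',
--     'Ignition Coil': 'Engine',
--     'Timing Belt': 'Engine',
--     'Serpentine Belt': 'Engine',
--     'V-Belt': 'Engine',
--     'Chain': 'Engine',
--     'Fuel Pump': 'Engine',
--     'Fuel Injector': 'Engine',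
--     'Throttle Body': 'Engine',
--     'Brake Pad': 'Brakes',
--     'Brake Rotor': 'Brakes',
--     'Brake Caliper': 'Brakes',
--     'Brake Line': 'Brakes',
--     'Alternator': 'Electrical',
--     'Starter': 'Electrical',
--     'Battery': 'Electrical',
--     'Voltage Regulator': 'Electrical',
--     'MAF Sensor': 'Electrical',
--     'O2 Sensor': 'Electrical',
--     'MAP Sensor': 'Electrical',
--     'TPS Sensor': 'Electrical',
--     'Knock Sensor': 'Electrical',
--     'Radiator': 'Cooling',
--     'Thermostat': 'Cooling',
--     'Water Pump': 'Cooling',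
--     'Cooling Fan': 'Cooling',
--     'Shock Absorber': 'Suspension',
--     'Strut': 'Suspension',
--     'Spring': 'Suspension',
--     'Control Arm': 'Suspension',
--     'Tie Rod': 'Suspension',
--     'Ball Joint': 'Suspension',
--     'Stabilizer Bar': 'Suspension',
--     'Bushing': 'Suspension',
--     'Headlight': 'Lighting',
--     'Taillight': 'Lighting',
--     'Turn Signal': 'Lighting',
--     'Bulb': 'Lighting',
--     'Tire': 'Wheels',
--     'Rim': 'Wheels',
--     'Hub Cap': 'Wheels',
--     'Valve Stem': 'Wheels',
--     'Exhaust Pipe': 'Exhaust',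
--     'Muffler': 'Exhaust',
--     'Cabin Filter': 'Filtration',
-- }
--
--
-- def _get_part_category(part_type: str) -> str:
--     """Map part type to general category"""
--     return _PART_TO_CATEGORY.get(part_type, 'General')
-- ===== Notes on version B (the rewrite author's own statement) =====
-- stated objective: idiomatic
-- what changed: Replaces the nested loop over per-category parts lists with a single flat part->category dictionary literal and one dict.get lookup with the 'General' default.
import Mathlib
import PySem

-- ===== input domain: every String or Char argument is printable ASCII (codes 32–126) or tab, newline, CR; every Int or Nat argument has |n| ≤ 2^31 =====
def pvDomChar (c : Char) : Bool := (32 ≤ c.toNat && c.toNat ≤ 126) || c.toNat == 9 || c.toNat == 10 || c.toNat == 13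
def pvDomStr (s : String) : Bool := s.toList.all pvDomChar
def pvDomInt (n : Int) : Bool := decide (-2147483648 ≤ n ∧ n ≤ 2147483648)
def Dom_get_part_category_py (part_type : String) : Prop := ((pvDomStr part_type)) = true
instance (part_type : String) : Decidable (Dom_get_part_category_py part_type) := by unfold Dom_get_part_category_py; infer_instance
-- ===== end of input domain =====

-- B replaces the per-call scan of per-category lists by a flat part->category dictionary literal with one lookup (objective: idiomatic).

-- ===== PORT A =====
-- A's literal `categories` dict, as an insertion-ordered association list of (category, parts).
def pvCategoriesA : List (String × List String) :=
  [("Engine", ["Air Filter", "Oil Filter", "Fuel Filter", "Spark Plug", "Ignition Coil",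
               "Timing Belt", "Serpentine Belt", "V-Belt", "Chain", "Fuel Pump",
               "Fuel Injector", "Throttle Body"]),
   ("Brakes", ["Brake Pad", "Brake Rotor", "Brake Caliper", "Brake Line"]),
   ("Electrical", ["Alternator", "Starter", "Battery", "Voltage Regulator", "MAF Sensor",
                   "O2 Sensor", "MAP Sensor", "TPS Sensor", "Knock Sensor"]),
   ("Cooling", ["Radiator", "Thermostat", "Water Pump", "Cooling Fan"]),
   ("Suspension", ["Shock Absorber", "Strut", "Spring", "Control Arm", "Tie Rod",
                   "Ball Joint", "Stabilizer Bar", "Bushing"]),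
   ("Lighting", ["Headlight", "Taillight", "Turn Signal", "Bulb"]),
   ("Wheels", ["Tire", "Rim", "Hub Cap", "Valve Stem"]),
   ("Exhaust", ["Exhaust Pipe", "Muffler"]),
   ("Filtration", ["Cabin Filter"])]

-- A's loop: `for category, parts in categories.items(): if part_type in parts: return category`
def pvFindCatA : List (String × List String) → String → String
  | [], _ => "General"
  | (category, parts) :: rest, part_type =>
      if part_type ∈ parts then category else pvFindCatA rest part_type

def get_part_category_py (part_type : String) : String :=
  pvFindCatA pvCategoriesA part_type

-- ===== PORT B =====
-- Source B's flat dict literal _PART_TO_CATEGORY, entries in source order.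
def pvPartToCategory : PySem.Dict String String :=
  PySem.Dict.mk
  [("Air Filter", "Engine"),
   ("Oil Filter", "Engine"),
   ("Fuel Filter", "Engine"),
   ("Spark Plug", "Engine"),
   ("Ignition Coil", "Engine"),
   ("Timing Belt", "Engine"),
   ("Serpentine Belt", "Engine"),
   ("V-Belt", "Engine"),
   ("Chain", "Engine"),
   ("Fuel Pump", "Engine"),
   ("Fuel Injector", "Engine"),
   ("Throttle Body", "Engine"),
   ("Brake Pad", "Brakes"),
   ("Brake Rotor", "Brakes"),
   ("Brake Caliper", "Brakes"),
   ("Brake Line", "Brakes"),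
   ("Alternator", "Electrical"),
   ("Starter", "Electrical"),
   ("Battery", "Electrical"),
   ("Voltage Regulator", "Electrical"),
   ("MAF Sensor", "Electrical"),
   ("O2 Sensor", "Electrical"),
   ("MAP Sensor", "Electrical"),
   ("TPS Sensor", "Electrical"),
   ("Knock Sensor", "Electrical"),
   ("Radiator", "Cooling"),
   ("Thermostat", "Cooling"),
   ("Water Pump", "Cooling"),
   ("Cooling Fan", "Cooling"),
   ("Shock Absorber", "Suspension"),
   ("Strut", "Suspension"),
   ("Spring", "Suspension"),
   ("Control Arm", "Suspension"),
   ("Tie Rod", "Suspension"),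
   ("Ball Joint", "Suspension"),
   ("Stabilizer Bar", "Suspension"),
   ("Bushing", "Suspension"),
   ("Headlight", "Lighting"),
   ("Taillight", "Lighting"),
   ("Turn Signal", "Lighting"),
   ("Bulb", "Lighting"),
   ("Tire", "Wheels"),
   ("Rim", "Wheels"),
   ("Hub Cap", "Wheels"),
   ("Valve Stem", "Wheels"),
   ("Exhaust Pipe", "Exhaust"),
   ("Muffler", "Exhaust"),
   ("Cabin Filter", "Filtration")]

-- Source B's body: _PART_TO_CATEGORY.get(part_type, 'General')
def get_part_category_py_alt (part_type : String) : String :=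
  pvPartToCategory.getD part_type "General"

-- ===== PRECONDITION & SPEC =====
def Spec_get_part_category_py (part_type : String) (out : String) : Prop := out = get_part_category_py_alt part_type
instance (part_type : String) (out : String) : Decidable (Spec_get_part_category_py part_type out) := by unfold Spec_get_part_category_py; infer_instance

-- ===== CLAIM (what is proved, stated in full; the proofs are below) =====
def Claim_equal_get_part_category_py : Prop := ∀ (part_type : String), Dom_get_part_category_py part_type → Spec_get_part_category_py part_type (get_part_category_py part_type)

-- ===== LEMMAS AND PROOFS =====

-- flatten a categories table into (part, category) pairs, first occurrence first
def pvFlat (l : List (String × List String)) : List (String × String) :=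
  l.flatMap (fun cp => cp.2.map (fun p => (p, cp.1)))

lemma pvGetD_mk_cons (k v x dflt : String) (rest : List (String × String)) :
    (PySem.Dict.mk ((k, v) :: rest)).getD x dflt
      = if k == x then v else (PySem.Dict.mk rest).getD x dflt := by
  rw [PySem.Dict.getD_eq_get?_getD, PySem.Dict.get?_mk_cons]
  split <;> simp [PySem.Dict.getD_eq_get?_getD]

lemma pvGetD_mk_map_append (c x dflt : String) (ps : List String) (rest : List (String × String)) :
    (PySem.Dict.mk (ps.map (fun p => (p, c)) ++ rest)).getD x dflt
      = if x ∈ ps then c else (PySem.Dict.mk rest).getD x dflt := by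
  induction ps with
  | nil => simp
  | cons p ps ih =>
      simp only [List.map_cons, List.cons_append, pvGetD_mk_cons, ih, List.mem_cons]
      by_cases h : p = x
      · simp [h]
      · have : ¬ x = p := fun hx => h hx.symm
        simp [h, this]

-- scanning the category table = one lookup in its flattened inversion
lemma pvFindCatA_eq_flat_lookup (l : List (String × List String)) (s : String) :
    pvFindCatA l s = (PySem.Dict.mk (pvFlat l)).getD s "General" := by
  induction l with
  | nil => simp [pvFindCatA, pvFlat, PySem.Dict.getD_eq_get?_getD, PySem.Dict.get?]
  | cons cp rest ih =>
      obtain ⟨c, ps⟩ := cp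
      simp only [pvFindCatA, pvFlat, List.flatMap_cons]
      rw [pvGetD_mk_map_append]
      split <;> [rfl; exact ih]

-- B's hand-written flat dict is exactly A's table flattened: a closed computation
lemma pvPartToCategory_eq_mk_flat :
    pvPartToCategory = PySem.Dict.mk (pvFlat pvCategoriesA) := by
  set_option maxRecDepth 4000 in decide

-- ===== VERDICT (by name: the statement is the Claim_ definition above) =====
theorem get_part_category_py_spec : Claim_equal_get_part_category_py := by
  intro s _
  unfold Spec_get_part_category_py get_part_category_py get_part_category_py_alt
  rw [pvPartToCategory_eq_mk_flat]
  exact pvFindCatA_eq_flat_lookup pvCategoriesA s
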